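-- pv_equiv track=rewrite | github.com/TheNityant/HABIT_TRACKER-Full-Stack-app- | backend/V4_GENE_DETECTION/V4_GENE_DET_ENGINE.py | classify_gene_type
-- ===== SOURCE A (Python) =====
-- def classify_gene_type(gene_name):
--     name = gene_name.lower()
--     if any(x in name for x in ['bla', 'ndm', 'kpc', 'oxa', 'ctx', 'vim', 'shv', 'tem']): return "Beta-Lactamase / Carbapenemase"
--     if any(x in name for x in ['tet', 'otr']): return "Tetracycline Resistance"
--     if any(x in name for x in ['mec', 'pbp']): return "Methicillin Resistance"
--     if any(x in name for x in ['sul', 'dfr']): return "Sulfonamide/Trimethoprim Resistance"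
--     if any(x in name for x in ['qnr', 'gyr', 'par']): return "Fluoroquinolone Resistance"
--     if 'mcr' in name: return "Colistin Resistance"
--     if any(x in name for x in ['erm', 'mef']): return "Macrolide Resistance"
--     if any(x in name for x in ['aac', 'ant', 'aph', 'aad']): return "Aminoglycoside Resistance"
--     if 'van' in name: return "Vancomycin Resistance"
--     return "Acquired Resistance Mechanism"
-- ===== SOURCE B (Python) =====
-- _GENE_LABELS = [
--     "Beta-Lactamase / Carbapenemase",
--     "Tetracycline Resistance",
--     "Methicillin Resistance",
--     "Sulfonamide/Trimethoprim Resistance",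
--     "Fluoroquinolone Resistance",
--     "Colistin Resistance",
--     "Macrolide Resistance",
--     "Aminoglycoside Resistance",
--     "Vancomycin Resistance",
--     "Acquired Resistance Mechanism",
-- ]
--
-- # every marker the cascade tests is exactly 3 characters long, so one sliding-window
-- # pass over the lowered name with a trigram -> priority table finds the best (lowest-
-- # numbered, i.e. earliest-cascade) matching category in a single scan
-- _TRIGRAM_PRIORITY = {
--     'bla': 0, 'ndm': 0, 'kpc': 0, 'oxa': 0, 'ctx': 0, 'vim': 0, 'shv': 0, 'tem': 0,
--     'tet': 1, 'otr': 1,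
--     'mec': 2, 'pbp': 2,
--     'sul': 3, 'dfr': 3,
--     'qnr': 4, 'gyr': 4, 'par': 4,
--     'mcr': 5,
--     'erm': 6, 'mef': 6,
--     'aac': 7, 'ant': 7, 'aph': 7, 'aad': 7,
--     'van': 8,
-- }
--
-- def classify_gene_type(gene_name):
--     name = gene_name.lower()
--     best = 9
--     for i in range(len(name) - 2):
--         p = _TRIGRAM_PRIORITY.get(name[i:i+3], 9)
--         if p < best:
--             best = p
--     return _GENE_LABELS[best]
-- ===== Notes on version B (the rewrite author's own statement) =====
-- stated objective: alternative
-- what changed: Replaces the nine-branch if-cascade of repeated substring searches (every marker is exactly 3 characters) with a single sliding-window pass over the lowered name that looks each trigram up in a priority table and keeps the minimum priority, indexing a label list at the end.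
import Mathlib
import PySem

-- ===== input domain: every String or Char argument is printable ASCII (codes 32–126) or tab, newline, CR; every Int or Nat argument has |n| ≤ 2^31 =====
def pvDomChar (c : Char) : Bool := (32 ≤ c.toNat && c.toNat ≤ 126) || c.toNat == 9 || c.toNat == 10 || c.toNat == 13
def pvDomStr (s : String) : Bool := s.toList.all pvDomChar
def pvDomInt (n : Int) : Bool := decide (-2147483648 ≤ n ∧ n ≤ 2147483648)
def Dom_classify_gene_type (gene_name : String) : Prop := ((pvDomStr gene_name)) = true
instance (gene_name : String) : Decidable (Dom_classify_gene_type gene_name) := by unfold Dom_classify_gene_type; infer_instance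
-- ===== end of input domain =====

-- B replaces the nine-branch substring cascade (all markers are 3 characters) by one
-- sliding-window pass keeping the minimum trigram priority; same result, different structure.

-- ===== PORT A =====
def classify_gene_type (gene_name : String) : String :=
  let name := PySem.Str.lower gene_name
  if ["bla", "ndm", "kpc", "oxa", "ctx", "vim", "shv", "tem"].any (fun x => PySem.Str.isIn x name) then "Beta-Lactamase / Carbapenemase"
  else if ["tet", "otr"].any (fun x => PySem.Str.isIn x name) then "Tetracycline Resistance"
  else if ["mec", "pbp"].any (fun x => PySem.Str.isIn x name) then "Methicillin Resistance"
  else if ["sul", "dfr"].any (fun x => PySem.Str.isIn x name) then "Sulfonamide/Trimethoprim Resistance"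
  else if ["qnr", "gyr", "par"].any (fun x => PySem.Str.isIn x name) then "Fluoroquinolone Resistance"
  else if PySem.Str.isIn "mcr" name then "Colistin Resistance"
  else if ["erm", "mef"].any (fun x => PySem.Str.isIn x name) then "Macrolide Resistance"
  else if ["aac", "ant", "aph", "aad"].any (fun x => PySem.Str.isIn x name) then "Aminoglycoside Resistance"
  else if PySem.Str.isIn "van" name then "Vancomycin Resistance"
  else "Acquired Resistance Mechanism"

-- ===== PORT B =====
def geneLabels : List String :=
  ["Beta-Lactamase / Carbapenemase",
   "Tetracycline Resistance",
   "Methicillin Resistance",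
   "Sulfonamide/Trimethoprim Resistance",
   "Fluoroquinolone Resistance",
   "Colistin Resistance",
   "Macrolide Resistance",
   "Aminoglycoside Resistance",
   "Vancomycin Resistance",
   "Acquired Resistance Mechanism"]

def trigramPriority : PySem.Dict String Int :=
  ⟨[("bla", 0), ("ndm", 0), ("kpc", 0), ("oxa", 0), ("ctx", 0), ("vim", 0), ("shv", 0), ("tem", 0),
    ("tet", 1), ("otr", 1),
    ("mec", 2), ("pbp", 2),
    ("sul", 3), ("dfr", 3),
    ("qnr", 4), ("gyr", 4), ("par", 4),
    ("mcr", 5),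
    ("erm", 6), ("mef", 6),
    ("aac", 7), ("ant", 7), ("aph", 7), ("aad", 7),
    ("van", 8)]⟩

def classify_gene_type_alt (gene_name : String) : String :=
  let name := PySem.Str.lower gene_name
  let best := (PySem.List.pyRange 0 (PySem.Str.len name - 2) 1).foldl
    (fun best i =>
      let p := PySem.Dict.getD trigramPriority (PySem.Str.slice name (some i) (some (i + 3))) 9
      if p < best then p else best) 9
  -- _GENE_LABELS[best]; best is always in 0..9, so pyGetD's default is never consulted
  PySem.List.pyGetD geneLabels best "Acquired Resistance Mechanism"

-- ===== PRECONDITION & SPEC =====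
def Spec_classify_gene_type (gene_name : String) (out : String) : Prop := out = classify_gene_type_alt gene_name
instance (gene_name : String) (out : String) : Decidable (Spec_classify_gene_type gene_name out) := by unfold Spec_classify_gene_type; infer_instance

-- ===== CLAIM (what is proved, stated in full; the proofs are below) =====
def Claim_equal_classify_gene_type : Prop := ∀ (gene_name : String), Dom_classify_gene_type gene_name → Spec_classify_gene_type gene_name (classify_gene_type gene_name)

-- ===== LEMMAS AND PROOFS =====

-- A's pattern groups, in cascade order (priority = index)
def grp : Nat → List String
  | 0 => ["bla", "ndm", "kpc", "oxa", "ctx", "vim", "shv", "tem"]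
  | 1 => ["tet", "otr"]
  | 2 => ["mec", "pbp"]
  | 3 => ["sul", "dfr"]
  | 4 => ["qnr", "gyr", "par"]
  | 5 => ["mcr"]
  | 6 => ["erm", "mef"]
  | 7 => ["aac", "ant", "aph", "aad"]
  | 8 => ["van"]
  | _ => []

def gFun (name : String) (i : Int) : Int :=
  PySem.Dict.getD trigramPriority (PySem.Str.slice name (some i) (some (i + 3))) 9

def idxs (name : String) : List Int := PySem.List.pyRange 0 (PySem.Str.len name - 2) 1

def bestOf (name : String) : Int := (((idxs name).map (gFun name)).foldl min 9)

lemma fold_eq_min (l : List Int) (f : Int → Int) (a : Int) :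
    l.foldl (fun b i => if f i < b then f i else b) a = (l.map f).foldl min a := by
  rw [List.foldl_map]
  congr 1
  funext b i
  rw [min_def]
  split_ifs <;> omega

lemma alt_eq (gene_name : String) :
    classify_gene_type_alt gene_name
      = PySem.List.pyGetD geneLabels (bestOf (PySem.Str.lower gene_name)) "Acquired Resistance Mechanism" := by
  unfold bestOf idxs gFun
  rw [← fold_eq_min]
  rfl

lemma mem_table :
    ∀ p ∈ trigramPriority.items,
      ∃ k : Fin 9, p.1 ∈ grp k.val ∧ p.2 = (k.val : Int) ∧ (p.1).toList.length = 3 := by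
  decide

lemma grp_val :
    ∀ k : Fin 9, ∀ x ∈ grp k.val,
      PySem.Dict.getD trigramPriority x 9 = (k.val : Int) ∧ x.toList.length = 3 := by
  decide

lemma getD_cases (w : String) :
    PySem.Dict.getD trigramPriority w 9 = 9 ∨
      ∃ k : Fin 9, PySem.Dict.getD trigramPriority w 9 = (k.val : Int) ∧ w ∈ grp k.val := by
  unfold PySem.Dict.getD PySem.Dict.get?
  cases hf : List.find? (fun p => p.1 == w) trigramPriority.items with
  | none => left; rfl
  | some p =>
    have hp := List.mem_of_find?_eq_some hf
    have hb := List.find?_some hf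
    have hw : p.1 = w := by simpa using hb
    obtain ⟨k, hk1, hk2, _⟩ := mem_table p hp
    right
    refine ⟨k, ?_, hw ▸ hk1⟩
    simp [hk2]

lemma window_exists (name x : String) (hx : x.toList.length = 3)
    (h : PySem.Str.isIn x name = true) :
    ∃ i ∈ PySem.List.pyRange 0 (PySem.Str.len name - 2) 1,
      PySem.Str.slice name (some i) (some (i + 3)) = x := by
  rw [PySem.Str.isIn_iff_infix] at h
  obtain ⟨u, v, huv⟩ := h
  have hlen : name.toList.length = u.length + x.toList.length + v.length := by
    rw [← huv]; simp; omega
  refine ⟨(u.length : Int), ?_, ?_⟩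
  · rw [PySem.List.mem_pyRange_one, PySem.Str.len_eq]
    omega
  · have htl : (PySem.Str.slice name (some (u.length : Int)) (some ((u.length : Int) + 3))).toList
        = x.toList := by
      rw [PySem.Str.toList_slice, PySem.Chars.slice_eq_listSlice]
      rw [show ((u.length : Int) + 3) = ((u.length : Int) + ((3 : Nat) : Int)) from by norm_num]
      rw [PySem.List.slice_natCast_add, ← huv, List.append_assoc, List.drop_left, ← hx,
        List.take_left]
    exact String.toList_inj.mp htl

lemma window_infix (name : String) (i : Int)
    (hi : i ∈ PySem.List.pyRange 0 (PySem.Str.len name - 2) 1) :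
    (PySem.Str.slice name (some i) (some (i + 3))).toList <:+: name.toList := by
  rw [PySem.List.mem_pyRange_one] at hi
  rw [PySem.Str.toList_slice, PySem.Chars.slice_eq_listSlice,
    PySem.List.slice_toNat _ hi.1 (by omega)]
  exact (List.take_prefix _ _).isInfix.trans (List.drop_suffix _ _).isInfix

lemma bestOf_le (name : String) (k : Fin 9) (x : String) (hx : x ∈ grp k.val)
    (h : PySem.Str.isIn x name = true) : bestOf name ≤ (k.val : Int) := by
  obtain ⟨hval, hlen⟩ := grp_val k x hx
  obtain ⟨i, hi, hslice⟩ := window_exists name x hlen h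
  have hg : gFun name i = (k.val : Int) := by unfold gFun; rw [hslice]; exact hval
  have hm : gFun name i ∈ (idxs name).map (gFun name) := List.mem_map_of_mem hi
  calc bestOf name ≤ gFun name i := (PySem.List.foldl_min_le _ _).2 _ hm
    _ = (k.val : Int) := hg

lemma bestOf_cases (name : String) :
    bestOf name = 9 ∨
      ∃ k : Fin 9, bestOf name = (k.val : Int) ∧
        ∃ x ∈ grp k.val, PySem.Str.isIn x name = true := by
  unfold bestOf
  rcases PySem.List.foldl_min_mem ((idxs name).map (gFun name)) 9 with h | h
  · exact Or.inl h
  · obtain ⟨i, hi, hgi⟩ := List.mem_map.mp h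
    rcases getD_cases (PySem.Str.slice name (some i) (some (i + 3))) with h9 | ⟨k, hk, hmem⟩
    · left; rw [← hgi]; unfold gFun; exact h9
    · right
      refine ⟨k, ?_, PySem.Str.slice name (some i) (some (i + 3)), hmem, ?_⟩
      · rw [← hgi]; unfold gFun; exact hk
      · rw [PySem.Str.isIn_iff_infix]
        exact window_infix name i hi

lemma bestOf_eq_of (nm : String) (k : Fin 9)
    (hk : (grp k.val).any (fun x => PySem.Str.isIn x nm) = true)
    (hlt : ∀ j : Fin 9, j.val < k.val → (grp j.val).any (fun x => PySem.Str.isIn x nm) = false) :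
    bestOf nm = (k.val : Int) := by
  obtain ⟨x, hx, hIn⟩ := List.any_eq_true.mp hk
  have hle := bestOf_le nm k x hx hIn
  rcases bestOf_cases nm with h9 | ⟨j, hj, x', hx', hIn'⟩
  · have := k.isLt; omega
  · by_cases hjk : j.val < k.val
    · have hc : ((grp j.val).any fun x => PySem.Str.isIn x nm) = true :=
        List.any_eq_true.mpr ⟨x', hx', hIn'⟩
      rw [hlt j hjk] at hc
      exact absurd hc (by decide)
    · rw [hj] at hle ⊢; omega

lemma bestOf_eq_nine (nm : String)
    (h : ∀ j : Fin 9, (grp j.val).any (fun x => PySem.Str.isIn x nm) = false) :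
    bestOf nm = 9 := by
  rcases bestOf_cases nm with h9 | ⟨j, hj, x', hx', hIn'⟩
  · exact h9
  · have hc : ((grp j.val).any fun x => PySem.Str.isIn x nm) = true :=
      List.any_eq_true.mpr ⟨x', hx', hIn'⟩
    rw [h j] at hc
    exact absurd hc (by decide)

-- ===== VERDICT (by name: the statement is the Claim_ definition above) =====
theorem classify_gene_type_spec : Claim_equal_classify_gene_type := by
  intro gene_name _
  unfold Spec_classify_gene_type
  rw [alt_eq]
  unfold classify_gene_type
  set nm := PySem.Str.lower gene_name with hnm
  by_cases c0 : (["bla", "ndm", "kpc", "oxa", "ctx", "vim", "shv", "tem"].any (fun x => PySem.Str.isIn x nm)) = true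
  · have hb := bestOf_eq_of nm ⟨0, by norm_num⟩ (by simpa [grp] using c0)
      (by intro j hj; simp at hj)
    simp only [if_pos c0]
    rw [hb]; decide
  · by_cases c1 : (["tet", "otr"].any (fun x => PySem.Str.isIn x nm)) = true
    · have hb := bestOf_eq_of nm ⟨1, by norm_num⟩ (by simpa [grp] using c1)
        (by intro j hj; fin_cases j <;> simp_all [grp])
      simp only [if_pos c1, if_neg c0]
      rw [hb]; decide
    · by_cases c2 : (["mec", "pbp"].any (fun x => PySem.Str.isIn x nm)) = true
      · have hb := bestOf_eq_of nm ⟨2, by norm_num⟩ (by simpa [grp] using c2)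
          (by intro j hj; fin_cases j <;> simp_all [grp])
        simp only [if_pos c2, if_neg c0, if_neg c1]
        rw [hb]; decide
      · by_cases c3 : (["sul", "dfr"].any (fun x => PySem.Str.isIn x nm)) = true
        · have hb := bestOf_eq_of nm ⟨3, by norm_num⟩ (by simpa [grp] using c3)
            (by intro j hj; fin_cases j <;> simp_all [grp])
          simp only [if_pos c3, if_neg c0, if_neg c1, if_neg c2]
          rw [hb]; decide
        · by_cases c4 : (["qnr", "gyr", "par"].any (fun x => PySem.Str.isIn x nm)) = true
          · have hb := bestOf_eq_of nm ⟨4, by norm_num⟩ (by simpa [grp] using c4)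
              (by intro j hj; fin_cases j <;> simp_all [grp])
            simp only [if_pos c4, if_neg c0, if_neg c1, if_neg c2, if_neg c3]
            rw [hb]; decide
          · by_cases c5 : (PySem.Str.isIn "mcr" nm) = true
            · have hb := bestOf_eq_of nm ⟨5, by norm_num⟩ (by simpa [grp] using c5)
                (by intro j hj; fin_cases j <;> simp_all [grp])
              simp only [if_pos c5, if_neg c0, if_neg c1, if_neg c2, if_neg c3, if_neg c4]
              rw [hb]; decide
            · by_cases c6 : (["erm", "mef"].any (fun x => PySem.Str.isIn x nm)) = true
              · have hb := bestOf_eq_of nm ⟨6, by norm_num⟩ (by simpa [grp] using c6)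
                  (by intro j hj; fin_cases j <;> simp_all [grp])
                simp only [if_pos c6, if_neg c0, if_neg c1, if_neg c2, if_neg c3, if_neg c4, if_neg c5]
                rw [hb]; decide
              · by_cases c7 : (["aac", "ant", "aph", "aad"].any (fun x => PySem.Str.isIn x nm)) = true
                · have hb := bestOf_eq_of nm ⟨7, by norm_num⟩ (by simpa [grp] using c7)
                    (by intro j hj; fin_cases j <;> simp_all [grp])
                  simp only [if_pos c7, if_neg c0, if_neg c1, if_neg c2, if_neg c3, if_neg c4, if_neg c5, if_neg c6]
                  rw [hb]; decide
                · by_cases c8 : (PySem.Str.isIn "van" nm) = true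
                  · have hb := bestOf_eq_of nm ⟨8, by norm_num⟩ (by simpa [grp] using c8)
                      (by intro j hj; fin_cases j <;> simp_all [grp])
                    simp only [if_pos c8, if_neg c0, if_neg c1, if_neg c2, if_neg c3, if_neg c4, if_neg c5, if_neg c6, if_neg c7]
                    rw [hb]; decide
                  · have hb := bestOf_eq_nine nm (by intro j; fin_cases j <;> simp_all [grp])
                    simp only [if_neg c0, if_neg c1, if_neg c2, if_neg c3, if_neg c4, if_neg c5, if_neg c6, if_neg c7, if_neg c8]
                    rw [hb]; decide
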